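-- pv_equiv track=rewrite | github.com/jimcortez/Atlas-v2-Model-Generator | generators/chromatik_generator.py | create_output_segments
-- ===== SOURCE A (Python) =====
-- from typing import Dict, List, Any
--
-- def create_output_segments(group_assignment: Dict[int, int]) -> List[Dict[str, Any]]:
--     """
--     Create output segments for each port/group.
--     Uses componentId references to reference ring components.
--
--     Args:
--         group_assignment: Dictionary mapping ring number to port/group number
--
--     Returns:
--         List of segment dictionaries
--     """
--     segments = []
--
--     # Group rings by port
--     rings_per_port = {}
--     for ring_num, port_num in group_assignment.items():
--         if port_num not in rings_per_port:
--             rings_per_port[port_num] = []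
--         rings_per_port[port_num].append(ring_num)
--
--     # Create segments - one segment per ring, using componentId references
--     # This allows Chromatik to properly map each ring component
--     for port_num in sorted(rings_per_port.keys()):
--         port_rings = sorted(rings_per_port[port_num])
--
--         # Create a segment for each ring in this port
--         # Each segment references the ring component by ID
--         for ring_num in port_rings:
--             segment = {
--                 "componentId": f"ring_{ring_num}"
--             }
--             segments.append(segment)
--
--     return segments
-- ===== SOURCE B (Python) =====
-- from typing import Dict, List, Any
--
-- def create_output_segments(group_assignment: Dict[int, int]) -> List[Dict[str, Any]]:
--     pairs = sorted((port_num, ring_num) for ring_num, port_num in group_assignment.items())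
--     return [{"componentId": f"ring_{ring_num}"} for _, ring_num in pairs]
-- ===== Notes on version B (the rewrite author's own statement) =====
-- stated objective: simpler
-- what changed: B drops A's rings-per-port bucketing dict and the two-level sorted-keys/sorted-bucket loops, instead flat-sorting the (port, ring) pairs once lexicographically and emitting one segment per pair.
import Mathlib
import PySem

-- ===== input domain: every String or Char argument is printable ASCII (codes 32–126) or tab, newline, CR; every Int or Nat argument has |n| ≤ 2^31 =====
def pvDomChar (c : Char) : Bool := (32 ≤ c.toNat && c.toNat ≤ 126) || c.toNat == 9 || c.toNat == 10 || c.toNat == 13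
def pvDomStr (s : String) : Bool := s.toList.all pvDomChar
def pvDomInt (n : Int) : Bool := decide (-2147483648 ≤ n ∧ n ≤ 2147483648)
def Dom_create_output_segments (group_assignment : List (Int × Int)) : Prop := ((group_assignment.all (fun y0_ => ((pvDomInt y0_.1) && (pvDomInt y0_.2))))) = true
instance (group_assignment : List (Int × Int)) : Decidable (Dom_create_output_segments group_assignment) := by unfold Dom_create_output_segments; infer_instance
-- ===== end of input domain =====

-- B replaces A's port-bucketing dict + per-bucket sorts by one flat lexicographic
-- sort of (port, ring) pairs (objective: simpler).

-- ===== PORT A =====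
-- loop body of A's first for-loop (dict bucketing), as a named helper
def pvStepA (d : PySem.Dict Int (List Int)) (rp : Int × Int) : PySem.Dict Int (List Int) :=
  let d := if d.contains rp.2 = false then d.insert rp.2 [] else d
  d.modify rp.2 [] (fun l => l ++ [rp.1])

def create_output_segments (group_assignment : List (Int × Int)) : List (List (String × String)) :=
  let rings_per_port : PySem.Dict Int (List Int) := group_assignment.foldl pvStepA ⟨[]⟩
  (PySem.List.sorted rings_per_port.keys (fun k => k)).foldl
    (fun segments port_num =>
      let port_rings := PySem.List.sorted (rings_per_port.getD port_num []) (fun k => k)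
      port_rings.foldl
        (fun segments ring_num =>
          segments ++ [[("componentId", "ring_" ++ PySem.Int.toStr ring_num)]])
        segments)
    []

-- ===== PORT B =====
def create_output_segments_alt (group_assignment : List (Int × Int)) : List (List (String × String)) :=
  let pairs := PySem.List.sorted (group_assignment.map (fun rp => (rp.2, rp.1)))
    (fun pr => (toLex pr : Lex (Int × Int)))
  pairs.map (fun pr => [("componentId", "ring_" ++ PySem.Int.toStr pr.2)])

-- ===== PRECONDITION & SPEC =====
def Spec_create_output_segments (group_assignment : List (Int × Int)) (out : List (List (String × String))) : Prop := out = create_output_segments_alt group_assignment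
instance (group_assignment : List (Int × Int)) (out : List (List (String × String))) : Decidable (Spec_create_output_segments group_assignment out) := by unfold Spec_create_output_segments; infer_instance

-- ===== CLAIM (what is proved, stated in full; the proofs are below) =====
def Claim_equal_create_output_segments : Prop := ∀ (group_assignment : List (Int × Int)), Dom_create_output_segments group_assignment → Spec_create_output_segments group_assignment (create_output_segments group_assignment)

-- ===== LEMMAS AND PROOFS =====
theorem pv_keys_insert (d : PySem.Dict Int (List Int)) (k : Int) (v : List Int) :
    (d.insert k v).keys = if d.contains k then d.keys else d.keys ++ [k] := by
  simp only [PySem.Dict.insert, PySem.Dict.keys]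
  split
  · simp only [List.map_map]
    apply List.map_congr_left
    intro p _
    simp only [Function.comp]
    split
    · next h => simp at h; simp [h]
    · rfl
  · simp

theorem pv_contains_iff (d : PySem.Dict Int (List Int)) (k : Int) :
    d.contains k = true ↔ k ∈ d.keys := by
  simp only [PySem.Dict.contains, PySem.Dict.keys, List.any_eq_true, List.mem_map, beq_iff_eq]


theorem pv_getD_absent (d : PySem.Dict Int (List Int)) (k : Int) (v : List Int)
    (h : d.contains k = false) : d.getD k v = v := by
  simp only [PySem.Dict.getD, PySem.Dict.get?, PySem.Dict.contains] at *
  rw [List.find?_eq_none.2]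
  · rfl
  · intro p hp
    simp only [List.any_eq_false] at h
    exact h p hp

theorem pv_contains_insert (d : PySem.Dict Int (List Int)) (k : Int) (v : List Int) :
    (d.insert k v).contains k = true := by
  rw [pv_contains_iff, pv_keys_insert]
  split
  · next h => exact (pv_contains_iff d k).1 h
  · simp

theorem pvStepA_keys (d : PySem.Dict Int (List Int)) (rp : Int × Int) :
    (pvStepA d rp).keys = if d.contains rp.2 then d.keys else d.keys ++ [rp.2] := by
  simp only [pvStepA, PySem.Dict.modify]
  rw [pv_keys_insert]
  by_cases h : d.contains rp.2
  · simp [h]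
  · simp only [Bool.not_eq_true] at h
    simp only [h, Bool.false_eq_true, not_false_eq_true, if_neg, if_true]
    rw [pv_contains_insert, if_pos rfl, pv_keys_insert, if_neg (by simp [h])]

theorem pvStepA_getD (d : PySem.Dict Int (List Int)) (rp : Int × Int) (q : Int) :
    (pvStepA d rp).getD q [] =
      if q = rp.2 then d.getD rp.2 [] ++ [rp.1] else d.getD q [] := by
  simp only [pvStepA, PySem.Dict.modify]
  by_cases h : d.contains rp.2 = false
  · rw [if_pos h, PySem.Dict.getD_insert, PySem.Dict.getD_insert, PySem.Dict.getD_insert,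
      pv_getD_absent d rp.2 [] h]
    split <;> simp
  · rw [if_neg h, PySem.Dict.getD_insert]

theorem pv_fold_getD (ga : List (Int × Int)) (d : PySem.Dict Int (List Int)) (q : Int) :
    (ga.foldl pvStepA d).getD q [] =
      d.getD q [] ++ (ga.filter (fun rp => rp.2 == q)).map (·.1) := by
  induction ga generalizing d with
  | nil => simp
  | cons rp ga ih =>
    rw [List.foldl_cons, ih, pvStepA_getD]
    by_cases h : rp.2 = q
    · simp [h.symm]
    · rw [if_neg (fun hq => h hq.symm)]
      simp only [List.filter_cons]
      rw [if_neg (by simp [h])]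

theorem pv_fold_keys_mem (ga : List (Int × Int)) (d : PySem.Dict Int (List Int)) (q : Int) :
    q ∈ (ga.foldl pvStepA d).keys ↔ q ∈ d.keys ∨ q ∈ ga.map (·.2) := by
  induction ga generalizing d with
  | nil => simp
  | cons rp ga ih =>
    rw [List.foldl_cons, ih, pvStepA_keys]
    by_cases h : d.contains rp.2
    · rw [if_pos h]
      simp only [List.map_cons, List.mem_cons]
      constructor
      · rintro (hq | hq)
        · exact Or.inl hq
        · exact Or.inr (Or.inr hq)
      · rintro (hq | rfl | hq)
        · exact Or.inl hq
        · exact Or.inl ((pv_contains_iff d rp.2).1 h)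
        · exact Or.inr hq
    · rw [if_neg h]
      simp only [List.mem_append, List.mem_singleton, List.map_cons, List.mem_cons]
      tauto

theorem pv_fold_keys_nodup (ga : List (Int × Int)) (d : PySem.Dict Int (List Int))
    (h : d.keys.Nodup) : (ga.foldl pvStepA d).keys.Nodup := by
  induction ga generalizing d with
  | nil => exact h
  | cons rp ga ih =>
    rw [List.foldl_cons]
    apply ih
    rw [pvStepA_keys]
    split
    · exact h
    · next hc =>
      simp only [List.nodup_append, List.nodup_singleton, List.mem_singleton]
      refine ⟨h, by simp, ?_⟩
      intro x hx y hy hxy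
      subst hy; subst hxy
      exact absurd ((pv_contains_iff d rp.2).2 hx) (by simp_all)

theorem pv_flatMap_filter_perm (ports : List Int) (K : List (Int × Int))
    (hnd : ports.Nodup) (hcov : ∀ x ∈ K, x.1 ∈ ports) :
    (ports.flatMap (fun p => K.filter (fun x => x.1 == p))).Perm K := by
  induction ports generalizing K with
  | nil =>
    have hK : K = [] := by
      cases K with
      | nil => rfl
      | cons x K => exact absurd (hcov x (by simp)) (by simp)
    simp [hK]
  | cons p ps ih =>
    rw [List.flatMap_cons]
    have hps : p ∉ ps ∧ ps.Nodup := by simpa using hnd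
    have hcongr : ps.flatMap (fun q => K.filter (fun x => x.1 == q)) =
        ps.flatMap (fun q => (K.filter (fun x => !(x.1 == p))).filter (fun x => x.1 == q)) := by
      have hblock : ∀ q ∈ ps, K.filter (fun x => x.1 == q) =
          (K.filter (fun x => !(x.1 == p))).filter (fun x => x.1 == q) := by
        intro q hq
        rw [List.filter_filter]
        apply List.filter_congr
        intro x _
        by_cases hx : x.1 = q
        · have hxp : ¬ x.1 = p := fun hp => hps.1 (hp ▸ hx ▸ hq)
          have hqp : ¬ q = p := fun h => hxp (by rw [hx, h])
          simp [hx, hqp]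
        · simp [hx]
      simp only [List.flatMap_def]
      rw [List.map_congr_left hblock]
    rw [hcongr]
    have hcov' : ∀ x ∈ K.filter (fun x => !(x.1 == p)), x.1 ∈ ps := by
      intro x hx
      rw [List.mem_filter] at hx
      have := hcov x hx.1
      simp only [List.mem_cons] at this
      rcases this with hp | hp
      · exact absurd hp (by simpa using hx.2)
      · exact hp
    exact ((ih _ hps.2 hcov').append_left _).trans (List.filter_append_perm _ K)

theorem create_output_segments_spec' (ga : List (Int × Int)) :
    create_output_segments ga = create_output_segments_alt ga := by
  have keys_nodup : (List.foldl pvStepA ⟨[]⟩ ga).keys.Nodup :=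
    pv_fold_keys_nodup ga ⟨[]⟩ (by simp [PySem.Dict.keys])
  have cov : ∀ x ∈ ga.map (fun rp => (rp.2, rp.1)), x.1 ∈ (List.foldl pvStepA ⟨[]⟩ ga).keys := by
    intro x hx
    rw [pv_fold_keys_mem]
    rcases List.mem_map.1 hx with ⟨rp, hrp, rfl⟩
    exact Or.inr (List.mem_map.2 ⟨rp, hrp, rfl⟩)
  have hblock : ∀ p : Int, ((List.foldl pvStepA ⟨[]⟩ ga).getD p []).map (fun r => (p, r)) =
      (ga.map (fun rp => (rp.2, rp.1))).filter (fun x => x.1 == p) := by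
    intro p
    rw [pv_fold_getD, pv_getD_absent _ _ _ rfl, List.nil_append, List.filter_map, List.map_map]
    have hpred : ((fun x : Int × Int => x.1 == p) ∘ (fun rp : Int × Int => (rp.2, rp.1))) =
        fun rp : Int × Int => rp.2 == p := rfl
    rw [hpred]
    apply List.map_congr_left
    intro rp hrp
    rw [List.mem_filter] at hrp
    have h2 : rp.2 = p := by simpa using hrp.2
    simp [Function.comp, h2]
  have hP : PySem.List.sorted (ga.map (fun rp => (rp.2, rp.1)))
        (fun pr => (toLex pr : Lex (Int × Int))) =
      (PySem.List.sorted (List.foldl pvStepA ⟨[]⟩ ga).keys (fun k => k)).flatMap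
        (fun p => (PySem.List.sorted ((List.foldl pvStepA ⟨[]⟩ ga).getD p []) (fun k => k)).map
          (fun r => (p, r))) := by
    have sk_nodup : (PySem.List.sorted (List.foldl pvStepA ⟨[]⟩ ga).keys (fun k => k)).Nodup :=
      ((PySem.List.sorted_perm _ _ _).symm.nodup) keys_nodup
    have sk_lt : List.Pairwise (· < ·)
        (PySem.List.sorted (List.foldl pvStepA ⟨[]⟩ ga).keys (fun k => k)) := by
      have h1 := PySem.List.sorted_pairwise (List.foldl pvStepA ⟨[]⟩ ga).keys (fun k => k)
      exact (h1.and sk_nodup).imp (fun hab => lt_of_le_of_ne hab.1 hab.2)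
    apply List.Perm.eq_of_pairwise
      (le := fun a b : Int × Int => (toLex a : Lex (Int × Int)) ≤ toLex b)
    · intro a b _ _ hab hba
      simpa using le_antisymm hab hba
    · exact PySem.List.sorted_pairwise _ _
    · rw [List.flatMap_def]
      apply List.pairwise_flatten.2
      constructor
      · intro l hl
        rcases List.mem_map.1 hl with ⟨p, _, rfl⟩
        apply List.pairwise_map.2
        have h1 := PySem.List.sorted_pairwise ((List.foldl pvStepA ⟨[]⟩ ga).getD p []) (fun k => k)
        refine h1.imp ?_
        intro a b hab
        exact Prod.Lex.toLex_le_toLex.2 (Or.inr ⟨rfl, hab⟩)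
      · apply List.pairwise_map.2
        apply sk_lt.imp
        intro p q hpq x hx y hy
        rcases List.mem_map.1 hx with ⟨r, _, rfl⟩
        rcases List.mem_map.1 hy with ⟨s, _, rfl⟩
        exact Prod.Lex.toLex_le_toLex.2 (Or.inl hpq)
    · refine (PySem.List.sorted_perm _ _ _).trans ?_
      refine ((List.Perm.flatMap (f := fun p =>
          (PySem.List.sorted ((List.foldl pvStepA ⟨[]⟩ ga).getD p []) (fun k => k)).map
            (fun r => (p, r)))
          (g := fun p => (ga.map (fun rp => (rp.2, rp.1))).filter (fun x => x.1 == p))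
          (PySem.List.sorted_perm _ _ _) ?_).trans
          (pv_flatMap_filter_perm _ _ keys_nodup cov)).symm
      intro p _
      dsimp only
      rw [← hblock p]
      exact ((PySem.List.sorted_perm _ _ _).map _)
  have hA : create_output_segments ga =
      ((PySem.List.sorted (List.foldl pvStepA ⟨[]⟩ ga).keys (fun k => k)).flatMap
        (fun p => (PySem.List.sorted ((List.foldl pvStepA ⟨[]⟩ ga).getD p []) (fun k => k)).map
          (fun r => [("componentId", "ring_" ++ PySem.Int.toStr r)]))) := by
    unfold create_output_segments
    simp only [PySem.List.foldl_append_singleton_eq_map, PySem.List.foldl_append_eq_flatMap,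
      List.nil_append]
  rw [hA]
  unfold create_output_segments_alt
  rw [hP, List.map_flatMap]
  simp only [List.map_map]
  rfl

-- ===== VERDICT (by name: the statement is the Claim_ definition above) =====
theorem create_output_segments_spec : Claim_equal_create_output_segments := by
  intro ga _
  unfold Spec_create_output_segments
  exact create_output_segments_spec' ga
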